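-- pv_equiv track=rewrite | github.com/orca44/mirage | python/mirage/commands/builtin/ssh/join.py | _build_join_map
-- ===== SOURCE A (Python) =====
-- def _build_join_map(
--     lines: list[str],
--     field_idx: int,
--     delimiter: str | None,
-- ) -> dict[str, list[list[str]]]:
--     result: dict[str, list[list[str]]] = {}
--     for line in lines:
--         parts = line.split(delimiter) if delimiter else line.split()
--         if field_idx < len(parts):
--             key = parts[field_idx]
--             rest = parts[:field_idx] + parts[field_idx + 1:]
--             if key not in result:
--                 result[key] = []
--             result[key].append(rest)
--     return result
-- ===== SOURCE B (Python) =====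
-- def _build_join_map(
--     lines: list[str],
--     field_idx: int,
--     delimiter: str | None,
-- ) -> dict[str, list[list[str]]]:
--     # Pass 1: flat list of (key, rest) pairs, one per usable line.
--     pairs = []
--     for line in lines:
--         parts = line.split(delimiter) if delimiter else line.split()
--         if field_idx < len(parts):
--             pairs.append((parts[field_idx], parts[:field_idx] + parts[field_idx + 1:]))
--     # Pass 2: keys in first-appearance order, then gather each key's rests.
--     keys = list(dict.fromkeys(k for k, _ in pairs))
--     return {k: [r for k2, r in pairs if k2 == k] for k in keys}
-- ===== Notes on version B (the rewrite author's own statement) =====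
-- stated objective: alternative
-- what changed: Replaces the single pass that mutates a dict of lists with a two-phase pipeline: first flatten the lines into a list of (key, rest) pairs, then build the result by mapping each first-occurrence-ordered distinct key to a gather over the pair list.
import Mathlib
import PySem

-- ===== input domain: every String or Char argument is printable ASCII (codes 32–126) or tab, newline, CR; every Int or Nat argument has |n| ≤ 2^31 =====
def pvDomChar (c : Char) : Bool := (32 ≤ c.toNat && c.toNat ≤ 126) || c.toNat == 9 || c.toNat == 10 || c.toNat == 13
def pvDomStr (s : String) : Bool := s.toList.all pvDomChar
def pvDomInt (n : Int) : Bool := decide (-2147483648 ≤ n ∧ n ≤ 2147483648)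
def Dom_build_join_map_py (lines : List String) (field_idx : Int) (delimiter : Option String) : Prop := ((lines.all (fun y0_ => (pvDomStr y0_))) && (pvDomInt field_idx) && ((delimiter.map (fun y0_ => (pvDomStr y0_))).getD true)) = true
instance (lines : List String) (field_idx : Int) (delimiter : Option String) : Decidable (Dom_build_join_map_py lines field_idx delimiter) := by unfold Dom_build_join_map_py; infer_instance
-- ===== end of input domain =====

-- B replaces A's single pass mutating a dict of lists by a two-phase pipeline (flatten to
-- (key, rest) pairs, then map each first-occurrence-ordered key to a gather); alternative, not faster.

-- shared transliteration of the per-line expression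
-- `line.split(delimiter) if delimiter else line.split()` (None and "" are falsy)
def pvParts (delimiter : Option String) (line : String) : List String :=
  match delimiter with
  | some d => if d = "" then PySem.Str.split₀ line else (PySem.Str.split? line d).getD []
  | none => PySem.Str.split₀ line

-- ===== PORT A =====
def build_join_map_py (lines : List String) (field_idx : Int) (delimiter : Option String) : List (String × List (List String)) :=
  (lines.foldl (fun result line =>
    let parts := pvParts delimiter line
    if field_idx < (parts.length : Int) then
      match PySem.List.pyGet? parts field_idx with
      | some key =>
        let rest := PySem.List.slice parts none (some field_idx) ++
                    PySem.List.slice parts (some (field_idx + 1)) none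
        let r1 := if result.contains key then result else result.insert key []
        r1.modify key [] (fun v => v ++ [rest])
      | none => result    -- parts[field_idx] raises IndexError in Python; excluded by Pre_
    else result) (PySem.Dict.empty : PySem.Dict String (List (List String)))).items

-- ===== PORT B =====
def build_join_map_py_alt (lines : List String) (field_idx : Int) (delimiter : Option String) : List (String × List (List String)) :=
  let pairs := lines.foldl (fun pairs line =>
    let parts := pvParts delimiter line
    if field_idx < (parts.length : Int) then
      match PySem.List.pyGet? parts field_idx with
      | some key =>
        pairs ++ [(key, PySem.List.slice parts none (some field_idx) ++
                        PySem.List.slice parts (some (field_idx + 1)) none)]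
      | none => pairs    -- parts[field_idx] raises IndexError in Python; excluded by Pre_
    else pairs) ([] : List (String × List String))
  let keys := PySem.List.dedup (pairs.map Prod.fst)
  keys.map (fun k => (k, (pairs.filter (fun p => p.1 == k)).map (·.2)))

-- ===== PRECONDITION & SPEC =====
-- Pre_ excludes exactly the inputs on which Python A raises IndexError: a negative
-- field_idx that reaches below the front of some line's parts list.
def Pre_build_join_map_py (lines : List String) (field_idx : Int) (delimiter : Option String) : Prop :=
  0 ≤ field_idx ∨ ∀ line ∈ lines, 0 ≤ field_idx + ((pvParts delimiter line).length : Int)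
instance (lines : List String) (field_idx : Int) (delimiter : Option String) : Decidable (Pre_build_join_map_py lines field_idx delimiter) := by unfold Pre_build_join_map_py; infer_instance
def pvWitness_build_join_map_py : List String × Int × Option String := (["alpha beta", "alpha gamma", "x y"], 0, none)

def Spec_build_join_map_py (lines : List String) (field_idx : Int) (delimiter : Option String) (out : List (String × List (List String))) : Prop := out = build_join_map_py_alt lines field_idx delimiter
instance (lines : List String) (field_idx : Int) (delimiter : Option String) (out : List (String × List (List String))) : Decidable (Spec_build_join_map_py lines field_idx delimiter out) := by unfold Spec_build_join_map_py; infer_instance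

-- ===== CLAIM (what is proved, stated in full; the proofs are below) =====
def Claim_equal_build_join_map_py : Prop := ∀ (lines : List String) (field_idx : Int) (delimiter : Option String), Dom_build_join_map_py lines field_idx delimiter → Pre_build_join_map_py lines field_idx delimiter → Spec_build_join_map_py lines field_idx delimiter (build_join_map_py lines field_idx delimiter)

-- ===== LEMMAS AND PROOFS =====

-- the (key, rest) pair a single line contributes (none = the line is skipped)
def pvPair (field_idx : Int) (delimiter : Option String) (line : String) : Option (String × List String) :=
  let parts := pvParts delimiter line
  if field_idx < (parts.length : Int) then
    match PySem.List.pyGet? parts field_idx with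
    | some key =>
      some (key, PySem.List.slice parts none (some field_idx) ++
                 PySem.List.slice parts (some (field_idx + 1)) none)
    | none => none
  else none

lemma modify_of_insert_empty {κ : Type} [BEq κ] [LawfulBEq κ] {ν : Type}
    (d : PySem.Dict κ (List ν)) (k : κ) (r : ν) :
    (if d.contains k then d else d.insert k []).modify k [] (fun v => v ++ [r]) =
      d.modify k [] (fun v => v ++ [r]) := by
  by_cases h : d.contains k
  · simp [h]
  · simp only [h, Bool.false_eq_true, if_neg, not_false_iff]
    simp only [PySem.Dict.modify, PySem.Dict.getD_insert_self,
      PySem.Dict.insert_insert_self,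
      PySem.Dict.getD_of_not_contains d ([] : List ν) (by simpa using h)]

lemma stepB_eq (field_idx : Int) (delimiter : Option String)
    (acc : List (String × List String)) (line : String) :
    (let parts := pvParts delimiter line
     if field_idx < (parts.length : Int) then
       match PySem.List.pyGet? parts field_idx with
       | some key =>
         acc ++ [(key, PySem.List.slice parts none (some field_idx) ++
                       PySem.List.slice parts (some (field_idx + 1)) none)]
       | none => acc
     else acc) =
    acc ++ (pvPair field_idx delimiter line).elim [] (fun p => [p]) := by
  simp only [pvPair]
  by_cases h : field_idx < ((pvParts delimiter line).length : Int)
  · simp only [h, if_pos]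
    cases PySem.List.pyGet? (pvParts delimiter line) field_idx <;> simp
  · simp [h]

lemma stepA_eq (field_idx : Int) (delimiter : Option String)
    (d : PySem.Dict String (List (List String))) (line : String) :
    (let parts := pvParts delimiter line
     if field_idx < (parts.length : Int) then
       match PySem.List.pyGet? parts field_idx with
       | some key =>
         let rest := PySem.List.slice parts none (some field_idx) ++
                     PySem.List.slice parts (some (field_idx + 1)) none
         let r1 := if d.contains key then d else d.insert key []
         r1.modify key [] (fun v => v ++ [rest])
       | none => d
     else d) =
    (pvPair field_idx delimiter line).elim d
      (fun p => d.modify p.1 [] (fun v => v ++ [p.2])) := by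
  simp only [pvPair]
  by_cases h : field_idx < ((pvParts delimiter line).length : Int)
  · simp only [h, if_pos]
    cases PySem.List.pyGet? (pvParts delimiter line) field_idx <;>
      simp [modify_of_insert_empty]
  · simp [h]

lemma pairs_eq_filterMap (lines : List String) (field_idx : Int) (delimiter : Option String)
    (acc : List (String × List String)) :
    lines.foldl (fun pairs line =>
      let parts := pvParts delimiter line
      if field_idx < (parts.length : Int) then
        match PySem.List.pyGet? parts field_idx with
        | some key =>
          pairs ++ [(key, PySem.List.slice parts none (some field_idx) ++
                          PySem.List.slice parts (some (field_idx + 1)) none)]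
        | none => pairs
      else pairs) acc = acc ++ lines.filterMap (pvPair field_idx delimiter) := by
  induction lines generalizing acc with
  | nil => simp
  | cons l t ih =>
    rw [List.foldl_cons, stepB_eq, List.filterMap_cons, ih]
    cases pvPair field_idx delimiter l <;> simp

lemma foldA_eq_foldPairs (lines : List String) (field_idx : Int) (delimiter : Option String)
    (d : PySem.Dict String (List (List String))) :
    lines.foldl (fun result line =>
      let parts := pvParts delimiter line
      if field_idx < (parts.length : Int) then
        match PySem.List.pyGet? parts field_idx with
        | some key =>
          let rest := PySem.List.slice parts none (some field_idx) ++
                      PySem.List.slice parts (some (field_idx + 1)) none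
          let r1 := if result.contains key then result else result.insert key []
          r1.modify key [] (fun v => v ++ [rest])
        | none => result
      else result) d =
    (lines.filterMap (pvPair field_idx delimiter)).foldl
      (fun d p => d.modify p.1 [] (fun v => v ++ [p.2])) d := by
  induction lines generalizing d with
  | nil => simp
  | cons l t ih =>
    rw [List.foldl_cons, stepA_eq, List.filterMap_cons]
    cases pvPair field_idx delimiter l <;> simp [ih]

lemma items_foldPairs (P : List (String × List String)) :
    ((P.foldl (fun d p => d.modify p.1 [] (fun v => v ++ [p.2]))
        (PySem.Dict.empty : PySem.Dict String (List (List String)))).items) =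
      (PySem.List.dedup (P.map Prod.fst)).map
        (fun k => (k, (P.filter (fun p => p.1 == k)).map (·.2))) := by
  have hnd : ((P.foldl (fun d p => d.modify p.1 [] (fun v => v ++ [p.2]))
      (PySem.Dict.empty : PySem.Dict String (List (List String)))).keys).Nodup :=
    PySem.Dict.nodup_keys_foldl_modify_key P Prod.fst [] (fun _ p => (· ++ [p.2])) _
      (by simp [PySem.Dict.keys_empty])
  rw [PySem.Dict.items_eq_map_keys _ hnd []]
  have hkeys : ((P.foldl (fun d p => d.modify p.1 [] (fun v => v ++ [p.2]))
      (PySem.Dict.empty : PySem.Dict String (List (List String)))).keys) =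
      PySem.List.dedup (P.map Prod.fst) := by
    rw [PySem.Dict.keys_foldl_modify_key]
    simp [PySem.Set.update_nil_left, PySem.Dict.keys_empty]
  rw [hkeys]
  apply List.map_congr_left
  intro k _
  rw [PySem.Dict.getD_foldl_modify_append]
  simp [PySem.Dict.getD_empty]

-- ===== VERDICT (by name: the statement is the Claim_ definition above) =====
theorem build_join_map_py_spec : Claim_equal_build_join_map_py := by
  intro lines field_idx delimiter _ _
  unfold Spec_build_join_map_py build_join_map_py build_join_map_py_alt
  rw [pairs_eq_filterMap, foldA_eq_foldPairs, items_foldPairs]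
  simp
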